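-- pv_equiv track=rewrite | github.com/rbasina/meetara-lab | tests/intelligence/test_tara_intelligence_windows.py | analyze_deep_patterns
-- ===== SOURCE A (Python) =====
-- from typing import Dict, Any, List
--
-- def analyze_deep_patterns(text: str) -> Dict[str, Any]:
--     """Analyze deep psychological and communication patterns"""
--
--     patterns = {
--         "cognitive_load": "high" if any(word in text.lower() for word in ["overwhelmed", "lost", "confused", "don't understand"]) else "normal",
--         "urgency_level": "high" if any(word in text.lower() for word in ["tomorrow", "urgent", "asap", "immediately"]) else "normal",
--         "communication_style": "indirect" if any(phrase in text.lower() for phrase in ["just wondering", "maybe you could", "if you don't mind"]) else "direct",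
--         "support_seeking": "high" if any(word in text.lower() for word in ["help", "support", "guidance", "advice"]) else "low"
--     }
--
--     return patterns
-- ===== SOURCE B (Python) =====
-- _KEYWORD_MAP = [
--     ("overwhelmed", "cognitive_load"),
--     ("lost", "cognitive_load"),
--     ("confused", "cognitive_load"),
--     ("don't understand", "cognitive_load"),
--     ("tomorrow", "urgency_level"),
--     ("urgent", "urgency_level"),
--     ("asap", "urgency_level"),
--     ("immediately", "urgency_level"),
--     ("just wondering", "communication_style"),
--     ("maybe you could", "communication_style"),
--     ("if you don't mind", "communication_style"),
--     ("help", "support_seeking"),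
--     ("support", "support_seeking"),
--     ("guidance", "support_seeking"),
--     ("advice", "support_seeking"),
-- ]
--
--
-- def analyze_deep_patterns(text: str):
--     # Single left-to-right scan: at each position, record which categories have a
--     # keyword starting there, instead of one substring search per keyword.
--     lowered = text.lower()
--     matched = set()
--     for i in range(len(lowered)):
--         for kw, key in _KEYWORD_MAP:
--             if lowered.startswith(kw, i):
--                 matched.add(key)
--     return {
--         "cognitive_load": "high" if "cognitive_load" in matched else "normal",
--         "urgency_level": "high" if "urgency_level" in matched else "normal",
--         "communication_style": "indirect" if "communication_style" in matched else "direct",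
--         "support_seeking": "high" if "support_seeking" in matched else "low",
--     }
-- ===== Notes on version B (the rewrite author's own statement) =====
-- stated objective: alternative
-- what changed: Instead of one substring-membership test per keyword per category, B lowers the text once and makes a single left-to-right scan over its positions, checking at each position which keywords of a flat keyword-to-category map start there and accumulating the matched categories in a set, from which the four labels are read off.
import Mathlib
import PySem

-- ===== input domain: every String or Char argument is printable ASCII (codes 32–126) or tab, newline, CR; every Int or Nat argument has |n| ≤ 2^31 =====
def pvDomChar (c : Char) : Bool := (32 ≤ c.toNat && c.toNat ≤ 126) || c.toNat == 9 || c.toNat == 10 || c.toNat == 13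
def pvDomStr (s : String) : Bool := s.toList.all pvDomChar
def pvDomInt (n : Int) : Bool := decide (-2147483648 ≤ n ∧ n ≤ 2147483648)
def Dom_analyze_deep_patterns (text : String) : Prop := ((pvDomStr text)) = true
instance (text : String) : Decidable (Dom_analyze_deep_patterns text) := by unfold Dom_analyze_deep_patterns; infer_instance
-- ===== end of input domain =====

-- B replaces the four per-keyword substring searches by a single left-to-right positional scan
-- of the lowered text against a flat keyword->category map, accumulating matched categories in a
-- set; objective: alternative (same asymptotic cost, different algorithm).


-- ===== PORT A =====
def analyze_deep_patterns (text : String) : List (String × String) :=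
  [("cognitive_load",
      if ["overwhelmed", "lost", "confused", "don't understand"].any
           (fun w => PySem.Str.isIn w (PySem.Str.lower text)) then "high" else "normal"),
   ("urgency_level",
      if ["tomorrow", "urgent", "asap", "immediately"].any
           (fun w => PySem.Str.isIn w (PySem.Str.lower text)) then "high" else "normal"),
   ("communication_style",
      if ["just wondering", "maybe you could", "if you don't mind"].any
           (fun p => PySem.Str.isIn p (PySem.Str.lower text)) then "indirect" else "direct"),
   ("support_seeking",
      if ["help", "support", "guidance", "advice"].any
           (fun w => PySem.Str.isIn w (PySem.Str.lower text)) then "high" else "low")]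

-- ===== PORT B =====
-- the flat keyword -> category map _KEYWORD_MAP of Source B
def pvKeywordMap : List (String × String) :=
  [("overwhelmed", "cognitive_load"),
   ("lost", "cognitive_load"),
   ("confused", "cognitive_load"),
   ("don't understand", "cognitive_load"),
   ("tomorrow", "urgency_level"),
   ("urgent", "urgency_level"),
   ("asap", "urgency_level"),
   ("immediately", "urgency_level"),
   ("just wondering", "communication_style"),
   ("maybe you could", "communication_style"),
   ("if you don't mind", "communication_style"),
   ("help", "support_seeking"),
   ("support", "support_seeking"),
   ("guidance", "support_seeking"),
   ("advice", "support_seeking")]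

-- Source B: single scan over the positions of the lowered text; 'range(len(lowered))' is
-- List.range (exact: i = 0..n-1) and 'lowered.startswith(kw, i)' for 0 ≤ i is exactly
-- PySem.Chars.startswith on (lowered.drop i).
def analyze_deep_patterns_alt (text : String) : List (String × String) :=
  let lowered := (PySem.Str.lower text).toList
  let matched : PySem.Set String :=
    (List.range lowered.length).foldl
      (fun m i =>
        pvKeywordMap.foldl
          (fun m p =>
            if PySem.Chars.startswith (lowered.drop i) p.1.toList then PySem.Set.add m p.2 else m)
          m)
      PySem.Set.empty
  [("cognitive_load", if PySem.Set.contains matched "cognitive_load" then "high" else "normal"),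
   ("urgency_level", if PySem.Set.contains matched "urgency_level" then "high" else "normal"),
   ("communication_style", if PySem.Set.contains matched "communication_style" then "indirect" else "direct"),
   ("support_seeking", if PySem.Set.contains matched "support_seeking" then "high" else "low")]

-- ===== PRECONDITION & SPEC =====
def Spec_analyze_deep_patterns (text : String) (out : List (String × String)) : Prop := out = analyze_deep_patterns_alt text
instance (text : String) (out : List (String × String)) : Decidable (Spec_analyze_deep_patterns text out) := by unfold Spec_analyze_deep_patterns; infer_instance

-- ===== CLAIM (what is proved, stated in full; the proofs are below) =====
def Claim_equal_analyze_deep_patterns : Prop := ∀ (text : String), Dom_analyze_deep_patterns text → Spec_analyze_deep_patterns text (analyze_deep_patterns text)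

-- ===== LEMMAS AND PROOFS =====

-- membership after the inner fold over the keyword map
theorem pv_mem_inner (f : String × String → Bool) (tbl : List (String × String))
    (m : PySem.Set String) (key : String) :
    key ∈ tbl.foldl (fun m p => if f p then PySem.Set.add m p.2 else m) m ↔
      key ∈ m ∨ ∃ p ∈ tbl, f p = true ∧ p.2 = key := by
  induction tbl generalizing m with
  | nil => simp
  | cons q t ih =>
    simp only [List.foldl_cons, ih]
    split_ifs with hq
    · simp [PySem.Set.mem_add, hq]
      tauto
    · simp only [List.mem_cons]
      constructor
      · rintro (h | ⟨p, hp, hf, hk⟩)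
        · exact Or.inl h
        · exact Or.inr ⟨p, Or.inr hp, hf, hk⟩
      · rintro (h | ⟨p, (rfl | hp), hf, hk⟩)
        · exact Or.inl h
        · exact absurd hf (by simp [hq])
        · exact Or.inr ⟨p, hp, hf, hk⟩

-- membership after the outer fold over the positions
theorem pv_mem_outer (g : Nat → String × String → Bool) (is : List Nat)
    (m : PySem.Set String) (key : String) :
    key ∈ is.foldl
        (fun m i => pvKeywordMap.foldl
          (fun m p => if g i p then PySem.Set.add m p.2 else m) m) m ↔
      key ∈ m ∨ ∃ i ∈ is, ∃ p ∈ pvKeywordMap, g i p = true ∧ p.2 = key := by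
  induction is generalizing m with
  | nil => simp
  | cons j t ih =>
    simp only [List.foldl_cons, ih, pv_mem_inner, List.mem_cons]
    constructor
    · rintro ((h | ⟨p, hp, hf, hk⟩) | ⟨i, hi, p, hp, hf, hk⟩)
      · exact Or.inl h
      · exact Or.inr ⟨j, Or.inl rfl, p, hp, hf, hk⟩
      · exact Or.inr ⟨i, Or.inr hi, p, hp, hf, hk⟩
    · rintro (h | ⟨i, (rfl | hi), p, hp, hf, hk⟩)
      · exact Or.inl (Or.inl h)
      · exact Or.inl (Or.inr ⟨p, hp, hf, hk⟩)
      · exact Or.inr ⟨i, hi, p, hp, hf, hk⟩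

-- a keyword starts at some scanned position iff it is a substring (for nonempty keywords)
theorem pv_scan_iff (s kw : List Char) (h : kw ≠ []) :
    (∃ i ∈ List.range s.length, PySem.Chars.startswith (s.drop i) kw = true) ↔
      PySem.Chars.isIn kw s = true := by
  rw [← PySem.Chars.exists_prefix_drop_iff_isIn]
  constructor
  · rintro ⟨i, -, hs⟩
    exact ⟨i, (PySem.Chars.startswith_iff _ _).1 hs⟩
  · rintro ⟨j, hj⟩
    have hjlt : j < s.length := by
      by_contra hge
      rw [List.drop_eq_nil_of_le (by omega)] at hj
      exact h (List.prefix_nil.mp hj)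
    exact ⟨j, List.mem_range.mpr hjlt, (PySem.Chars.startswith_iff _ _).2 hj⟩

-- the matched set of B's scan contains a category iff some of its keywords is a substring
theorem pv_contains_scan (s : List Char) (key : String) :
    PySem.Set.contains
      ((List.range s.length).foldl
        (fun m i => pvKeywordMap.foldl
          (fun m p =>
            if PySem.Chars.startswith (s.drop i) p.1.toList then PySem.Set.add m p.2 else m) m)
        PySem.Set.empty) key = true ↔
      ∃ p ∈ pvKeywordMap, p.2 = key ∧ PySem.Chars.isIn p.1.toList s = true := by
  rw [PySem.Set.contains_iff, pv_mem_outer]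
  have hne : ∀ p ∈ pvKeywordMap, p.1.toList ≠ [] := by decide
  constructor
  · rintro (h | ⟨i, hi, p, hp, hf, hk⟩)
    · simp [PySem.Set.empty] at h
    · exact ⟨p, hp, hk, (pv_scan_iff s _ (hne p hp)).1 ⟨i, hi, hf⟩⟩
  · rintro ⟨p, hp, hk, hin⟩
    obtain ⟨i, hi, hs⟩ := (pv_scan_iff s _ (hne p hp)).2 hin
    exact Or.inr ⟨i, hi, p, hp, hs, hk⟩

-- ===== VERDICT (by name: the statement is the Claim_ definition above) =====
theorem analyze_deep_patterns_spec : Claim_equal_analyze_deep_patterns := by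
  intro text _
  unfold Spec_analyze_deep_patterns analyze_deep_patterns analyze_deep_patterns_alt
  have hkey : ∀ (key : String) (kws : List String),
      (∀ w ∈ kws, (w, key) ∈ pvKeywordMap) →
      (∀ p ∈ pvKeywordMap, p.2 = key → p.1 ∈ kws) →
      kws.any (fun w => PySem.Str.isIn w (PySem.Str.lower text)) =
        PySem.Set.contains
          ((List.range (PySem.Str.lower text).toList.length).foldl
            (fun m i => pvKeywordMap.foldl
              (fun m p =>
                if PySem.Chars.startswith ((PySem.Str.lower text).toList.drop i) p.1.toList
                then PySem.Set.add m p.2 else m) m)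
            PySem.Set.empty) key := by
    intro key kws h1 h2
    rw [Bool.eq_iff_iff, List.any_eq_true, pv_contains_scan]
    constructor
    · rintro ⟨w, hw, hin⟩
      refine ⟨(w, key), h1 w hw, rfl, ?_⟩
      simpa [PySem.Str.isIn] using hin
    · rintro ⟨p, hp, hk, hin⟩
      exact ⟨p.1, h2 p hp hk, by simpa [PySem.Str.isIn] using hin⟩
  rw [hkey "cognitive_load" _ (by decide) (by decide),
      hkey "urgency_level" _ (by decide) (by decide),
      hkey "communication_style" _ (by decide) (by decide),
      hkey "support_seeking" _ (by decide) (by decide)]
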